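-- pv_equiv track=rewrite | github.com/helm-hammer-hand/comp_135_machine_learning | perceptron/knn.py | region_dist
-- ===== SOURCE A (Python) =====
-- def eu_sq(k,p1,p2):
--     # returns euclidian distance squared
--     d = 0
--     for dimension in range(k):
--         d += (p1[dimension] - p2[dimension])**2
--     return d
--
-- def region_dist(region, point):
--     # distance between a point and the closest point in the boundary region
--     bounds = region['bounds']
--     closest_point = []
--     for dimension in range(len(bounds)):
--         if point[dimension] < bounds[dimension]['min'] :
--             closest_point.append(bounds[dimension]['min'])
--         elif point[dimension] > bounds[dimension]['max'] :
--             closest_point.append(bounds[dimension]['max'])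
--         else :
--             closest_point.append(point[dimension])
--     return eu_sq(len(bounds), point, closest_point)
-- ===== SOURCE B (Python) =====
-- def region_dist(region, point):
--     # One fused pass: accumulate the squared distance per dimension directly,
--     # without materialising the clamped closest point or a second loop.
--     d = 0
--     for b, p in zip(region['bounds'], point):
--         if p < b['min']:
--             d += (b['min'] - p) ** 2
--         elif p > b['max']:
--             d += (p - b['max']) ** 2
--     return d
-- ===== Notes on version B (the rewrite author's own statement) =====
-- stated objective: simpler
-- what changed: Replaces the two-phase algorithm (build a clamped closest-point list, then a second loop summing squared coordinate differences) with a single zip loop that accumulates the per-dimension squared overshoot directly, keeping only the scalar accumulator.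
import Mathlib
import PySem

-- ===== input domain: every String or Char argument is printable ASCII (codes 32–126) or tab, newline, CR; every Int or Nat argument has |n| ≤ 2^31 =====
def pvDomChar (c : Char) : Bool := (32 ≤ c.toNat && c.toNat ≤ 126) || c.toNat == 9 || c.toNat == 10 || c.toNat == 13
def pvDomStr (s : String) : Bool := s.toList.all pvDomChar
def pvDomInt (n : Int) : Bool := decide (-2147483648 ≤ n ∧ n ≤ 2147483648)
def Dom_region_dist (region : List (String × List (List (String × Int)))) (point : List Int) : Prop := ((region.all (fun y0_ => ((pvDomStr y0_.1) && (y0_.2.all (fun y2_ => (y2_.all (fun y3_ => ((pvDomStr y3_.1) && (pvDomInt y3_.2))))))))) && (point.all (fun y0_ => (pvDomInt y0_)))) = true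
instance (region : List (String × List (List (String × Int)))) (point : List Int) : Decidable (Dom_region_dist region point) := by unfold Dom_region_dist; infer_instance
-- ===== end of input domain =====

-- B fuses A's two passes (build clamped closest point, then sum squared differences)
-- into one zip loop accumulating the squared distance directly (objective: simpler).


-- ===== PORT A =====
-- helper eu_sq: 'd += (p1[dim] - p2[dim])**2' over range(k); total form pyGetD is
-- exact under Pre_ (all indices in range)
def eu_sq (k : Int) (p1 p2 : List Int) : Int :=
  (PySem.List.pyRange 0 k 1).foldl
    (fun d dim => d + (PySem.List.pyGetD p1 dim 0 - PySem.List.pyGetD p2 dim 0) ^ 2) 0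

def region_dist (region : List (String × List (List (String × Int)))) (point : List Int) : Int :=
  let bounds := ((PySem.Dict.mk region).get? "bounds").getD []   -- KeyError excluded by Pre_
  let closest_point := (PySem.List.pyRange 0 (bounds.length : Int) 1).foldl
    (fun cp dim =>
      let b := PySem.List.pyGetD bounds dim []
      let p := PySem.List.pyGetD point dim 0
      if p < ((PySem.Dict.mk b).get? "min").getD 0 then
        cp ++ [((PySem.Dict.mk b).get? "min").getD 0]
      else if p > ((PySem.Dict.mk b).get? "max").getD 0 then
        cp ++ [((PySem.Dict.mk b).get? "max").getD 0]
      else cp ++ [p]) []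
  eu_sq (bounds.length : Int) point closest_point

-- ===== PORT B =====
def region_dist_alt (region : List (String × List (List (String × Int)))) (point : List Int) : Int :=
  let bounds := ((PySem.Dict.mk region).get? "bounds").getD []   -- KeyError excluded by Pre_
  (bounds.zip point).foldl
    (fun d bp =>
      if bp.2 < ((PySem.Dict.mk bp.1).get? "min").getD 0 then
        d + (((PySem.Dict.mk bp.1).get? "min").getD 0 - bp.2) ^ 2
      else if bp.2 > ((PySem.Dict.mk bp.1).get? "max").getD 0 then
        d + (bp.2 - ((PySem.Dict.mk bp.1).get? "max").getD 0) ^ 2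
      else d) 0

-- ===== PRECONDITION & SPEC =====
-- Pre_ = exactly where Python A returns: the region has a 'bounds' key, the point has
-- at least as many dimensions as bounds, and each bound dict has a 'min' key and —
-- unless the coordinate is below 'min', in which case Python short-circuits before
-- reading it — a 'max' key (otherwise A raises KeyError / IndexError).
def Pre_region_dist (region : List (String × List (List (String × Int)))) (point : List Int) : Prop :=
  ((PySem.Dict.mk region).get? "bounds").isSome = true ∧
  (((PySem.Dict.mk region).get? "bounds").getD []).length ≤ point.length ∧
  ∀ bp ∈ (((PySem.Dict.mk region).get? "bounds").getD []).zip point,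
    ((PySem.Dict.mk bp.1).get? "min").isSome = true ∧
    (bp.2 < ((PySem.Dict.mk bp.1).get? "min").getD 0 ∨ ((PySem.Dict.mk bp.1).get? "max").isSome = true)
instance (region : List (String × List (List (String × Int)))) (point : List Int) : Decidable (Pre_region_dist region point) := by unfold Pre_region_dist; infer_instance

def pvWitness_region_dist : (List (String × List (List (String × Int)))) × List Int :=
  ([("bounds", [[("min", 0), ("max", 2)]])], [5])

def Spec_region_dist (region : List (String × List (List (String × Int)))) (point : List Int) (out : Int) : Prop := out = region_dist_alt region point
instance (region : List (String × List (List (String × Int)))) (point : List Int) (out : Int) : Decidable (Spec_region_dist region point out) := by unfold Spec_region_dist; infer_instance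

-- ===== CLAIM (what is proved, stated in full; the proofs are below) =====
def Claim_equal_region_dist : Prop := ∀ (region : List (String × List (List (String × Int)))) (point : List Int), Dom_region_dist region point → Pre_region_dist region point → Spec_region_dist region point (region_dist region point)

-- ===== LEMMAS AND PROOFS =====

def clampAt (bs : List (List (String × Int))) (point : List Int) (dim : Int) : Int :=
  let b := PySem.List.pyGetD bs dim []
  let p := PySem.List.pyGetD point dim 0
  if p < ((PySem.Dict.mk b).get? "min").getD 0 then ((PySem.Dict.mk b).get? "min").getD 0
  else if p > ((PySem.Dict.mk b).get? "max").getD 0 then ((PySem.Dict.mk b).get? "max").getD 0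
  else p

def contrib (bp : List (String × Int) × Int) : Int :=
  if bp.2 < ((PySem.Dict.mk bp.1).get? "min").getD 0 then
    (((PySem.Dict.mk bp.1).get? "min").getD 0 - bp.2) ^ 2
  else if bp.2 > ((PySem.Dict.mk bp.1).get? "max").getD 0 then
    (bp.2 - ((PySem.Dict.mk bp.1).get? "max").getD 0) ^ 2
  else 0

theorem region_dist_core (bs : List (List (String × Int))) (point : List Int)
    (hlen : bs.length ≤ point.length) :
    (PySem.List.pyRange 0 (bs.length : Int) 1).foldl
      (fun d dim => d + (PySem.List.pyGetD point dim 0 -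
         PySem.List.pyGetD
           ((PySem.List.pyRange 0 (bs.length : Int) 1).foldl
             (fun cp dim =>
               let b := PySem.List.pyGetD bs dim []
               let p := PySem.List.pyGetD point dim 0
               if p < ((PySem.Dict.mk b).get? "min").getD 0 then
                 cp ++ [((PySem.Dict.mk b).get? "min").getD 0]
               else if p > ((PySem.Dict.mk b).get? "max").getD 0 then
                 cp ++ [((PySem.Dict.mk b).get? "max").getD 0]
               else cp ++ [p]) [])
           dim 0) ^ 2) 0
    = (bs.zip point).foldl
        (fun d bp =>
          if bp.2 < ((PySem.Dict.mk bp.1).get? "min").getD 0 then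
            d + (((PySem.Dict.mk bp.1).get? "min").getD 0 - bp.2) ^ 2
          else if bp.2 > ((PySem.Dict.mk bp.1).get? "max").getD 0 then
            d + (bp.2 - ((PySem.Dict.mk bp.1).get? "max").getD 0) ^ 2
          else d) 0 := by
  -- Step 1: the closest-point fold is a map of clampAt over the range
  have h1 : (PySem.List.pyRange 0 (bs.length : Int) 1).foldl
             (fun cp dim =>
               let b := PySem.List.pyGetD bs dim []
               let p := PySem.List.pyGetD point dim 0
               if p < ((PySem.Dict.mk b).get? "min").getD 0 then
                 cp ++ [((PySem.Dict.mk b).get? "min").getD 0]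
               else if p > ((PySem.Dict.mk b).get? "max").getD 0 then
                 cp ++ [((PySem.Dict.mk b).get? "max").getD 0]
               else cp ++ [p]) []
           = (PySem.List.pyRange 0 (bs.length : Int) 1).map (clampAt bs point) := by
    have hf : (fun (cp : List Int) dim =>
               let b := PySem.List.pyGetD bs dim []
               let p := PySem.List.pyGetD point dim 0
               if p < ((PySem.Dict.mk b).get? "min").getD 0 then
                 cp ++ [((PySem.Dict.mk b).get? "min").getD 0]
               else if p > ((PySem.Dict.mk b).get? "max").getD 0 then
                 cp ++ [((PySem.Dict.mk b).get? "max").getD 0]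
               else cp ++ [p])
             = (fun cp dim => cp ++ [clampAt bs point dim]) := by
      funext cp dim
      simp only [clampAt]
      split_ifs <;> rfl
    rw [hf, PySem.List.foldl_append_singleton_eq_map, List.nil_append]
  rw [h1]
  -- Step 2: replace the lookup into the mapped list by clampAt, then sum
  refine ((PySem.List.foldl_congr_mem _ _
      (fun d dim => d + (PySem.List.pyGetD point dim 0 - clampAt bs point dim) ^ 2) _ ?_).trans ?_)
  · intro acc dim hmem
    rw [PySem.List.mem_pyRange_one] at hmem
    rw [PySem.List.pyGetD_map_pyRange_of_nonneg _ _ _ _ hmem.1 hmem.2]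
  rw [PySem.List.foldl_add (g := fun dim =>
        (PySem.List.pyGetD point dim 0 - clampAt bs point dim) ^ 2)]
  -- Step 3: RHS as a sum
  have h2 : (fun (d : Int) (bp : List (String × Int) × Int) =>
          if bp.2 < ((PySem.Dict.mk bp.1).get? "min").getD 0 then
            d + (((PySem.Dict.mk bp.1).get? "min").getD 0 - bp.2) ^ 2
          else if bp.2 > ((PySem.Dict.mk bp.1).get? "max").getD 0 then
            d + (bp.2 - ((PySem.Dict.mk bp.1).get? "max").getD 0) ^ 2
          else d)
        = (fun d bp => d + contrib bp) := by
    funext d bp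
    simp only [contrib]
    split_ifs <;> ring
  rw [h2, PySem.List.foldl_add (g := contrib)]
  simp only [zero_add]
  -- Step 4: the two mapped lists agree elementwise
  congr 1
  rw [PySem.List.pyRange_one]
  apply List.ext_getElem
  · simp [List.length_zip]; omega
  · intro k hk1 hk2
    simp only [List.getElem_map, List.getElem_range, List.getElem_zip]
    have hkbs : k < bs.length := by
      simp [List.length_zip] at hk2; omega
    have hkpt : k < point.length := lt_of_lt_of_le hkbs hlen
    simp only [clampAt, contrib, zero_add, PySem.List.pyGetD_natCast,
      List.getD_eq_getElem _ _ hkbs, List.getD_eq_getElem _ _ hkpt]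
    split_ifs <;> ring

-- ===== VERDICT (by name: the statement is the Claim_ definition above) =====
theorem region_dist_spec : Claim_equal_region_dist := by
  intro region point _hdom hpre
  unfold Spec_region_dist region_dist region_dist_alt eu_sq
  exact region_dist_core _ _ hpre.2.1
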